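-- pv_equiv track=rewrite | github.com/yccc233/bs_diseaseTriples | common.py | replace_color_list
-- ===== SOURCE A (Python) =====
-- def replace_color(text, word, color):
--     new_word = '\033[0' + color + 'm' + word + '\033[0m'
--     len_w = len(word)
--     len_t = len(text)
--     for i in range(len_t - len_w, -1, -1):
--         if text[i: i + len_w] == word:
--             text = text[:i] + new_word + text[i + len_w:]
--     return text
--
-- def is_in_each_other(list):
--     le = len(list)
--     for i in range(0, le):
--         for j in range(0, le):
--             if list[j].find(list[i]) >= 0 and i != j:
--                 return True
--     return False
--
-- def replace_color_list(text, word, color):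
--     if is_in_each_other(word):
--         return replace_color(text, word[0], color)
--     for w in word:
--         new_word = '\033[0' + color + 'm' + w + '\033[0m'
--         len_w = len(w)
--         len_t = len(text)
--         for i in range(len_t - len_w, -1, -1):
--             if text[i: i + len_w] == w:
--                 text = text[:i] + new_word + text[i + len_w:]
--     return text
-- ===== SOURCE B (Python) =====
-- def _any_contains_other(words):
--     return any(a in b for i, a in enumerate(words) for j, b in enumerate(words) if i != j)
--
-- def replace_color_list(text, word, color):
--     if _any_contains_other(word):
--         word = word[:1]
--     for w in word:
--         nw = '\033[0' + color + 'm' + w + '\033[0m'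
--         if not w:
--             # empty pattern matches at every position
--             text = nw + ''.join(c + nw for c in text)
--             continue
--         end = len(text)
--         pieces = []
--         while True:
--             j = text.rfind(w, 0, end)
--             if j < 0:
--                 break
--             pieces.append(text[j + len(w):end])
--             end = j
--         pieces.append(text[:end])
--         text = nw.join(reversed(pieces))
--     return text
-- ===== Notes on version B (the rewrite author's own statement) =====
-- stated objective: alternative
-- what changed: Per word, A repeatedly rebuilds the whole string at every match while scanning every index right-to-left on the mutated text; B locates the same matches right-to-left with str.rfind on the immutable original (replaced regions are skipped by construction) and assembles the result once with a join over collected pieces.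
import Mathlib
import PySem

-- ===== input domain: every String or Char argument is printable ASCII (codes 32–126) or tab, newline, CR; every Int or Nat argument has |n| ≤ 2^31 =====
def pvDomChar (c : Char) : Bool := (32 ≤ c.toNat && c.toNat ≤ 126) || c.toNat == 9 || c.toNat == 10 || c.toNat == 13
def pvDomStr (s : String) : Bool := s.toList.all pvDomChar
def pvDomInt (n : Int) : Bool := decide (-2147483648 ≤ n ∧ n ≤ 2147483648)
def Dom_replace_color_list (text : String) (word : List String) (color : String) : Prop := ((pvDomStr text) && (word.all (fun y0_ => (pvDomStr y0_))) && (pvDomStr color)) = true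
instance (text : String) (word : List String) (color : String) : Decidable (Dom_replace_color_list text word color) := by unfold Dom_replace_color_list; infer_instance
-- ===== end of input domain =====

-- B replaces A's mutate-the-whole-string-per-match right-to-left scan by rfind-based
-- right-to-left match collection over the immutable original plus a single join.

-- ===== PORT A =====

-- new_word = '\033[0' + color + 'm' + w + '\033[0m'  (shared literal construction of both Pythons)
def pvNw (color w : List Char) : List Char :=
  [Char.ofNat 27, '[', '0'] ++ color ++ ['m'] ++ w ++ [Char.ofNat 27, '[', '0', 'm']

-- the right-to-left in-place replacement loop of replace_color (also inlined in replace_color_list)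
def pvLoopA (t w nw : List Char) : List Char :=
  (PySem.List.pyRange ((t.length : Int) - (w.length : Int)) (-1) (-1)).foldl
    (fun cur i =>
      if PySem.List.slice cur (some i) (some (i + (w.length : Int))) = w then
        PySem.List.slice cur none (some i) ++ nw ++ PySem.List.slice cur (some (i + (w.length : Int))) none
      else cur) t

-- def replace_color(text, word, color)
def pvReplaceColorA (t w c : List Char) : List Char := pvLoopA t w (pvNw c w)

-- def is_in_each_other(list)
def pvInEachOtherA (l : List (List Char)) : Bool :=
  (PySem.List.pyRange 0 (l.length : Int) 1).any fun i =>
    (PySem.List.pyRange 0 (l.length : Int) 1).any fun j =>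
      decide (0 ≤ PySem.Chars.find (PySem.List.pyGetD l j []) (PySem.List.pyGetD l i [])) && decide (i ≠ j)

def pvListA (t : List Char) (ws : List (List Char)) (c : List Char) : List Char :=
  if pvInEachOtherA ws then pvReplaceColorA t (PySem.List.pyGetD ws 0 []) c
  else ws.foldl (fun text w => pvLoopA text w (pvNw c w)) t

def replace_color_list (text : String) (word : List String) (color : String) : String :=
  String.ofList (pvListA text.toList (word.map String.toList) color.toList)

-- ===== PORT B =====

-- any(a in b for i, a in enumerate(words) for j, b in enumerate(words) if i != j)
def pvMutualB (ws : List (List Char)) : Bool :=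
  (PySem.List.enumerate ws 0).any fun ia =>
    (PySem.List.enumerate ws 0).any fun jb =>
      decide (ia.1 ≠ jb.1) && PySem.Chars.isIn ia.2 jb.2

-- the rfind while-loop collecting pieces right-to-left (fuel only makes the recursion structural)
def pvPiecesB (t w : List Char) : Nat → Nat → List (List Char) → List (List Char) × Nat
  | 0, e, pieces => (pieces, e)
  | fuel + 1, e, pieces =>
    let j := PySem.Chars.rfindFrom t w 0 (some (e : Int))
    if j < 0 then (pieces, e)
    else pvPiecesB t w fuel j.toNat
      (pieces ++ [PySem.List.slice t (some (j + (w.length : Int))) (some (e : Int))])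

-- one word of B's loop body
def pvOneB (t w nw : List Char) : List Char :=
  if w = [] then nw ++ t.flatMap (fun ch => ch :: nw)
  else
    let pe := pvPiecesB t w (t.length + 1) t.length []
    PySem.Chars.join nw ((pe.1 ++ [PySem.List.slice t none (some (pe.2 : Int))]).reverse)

def pvListB (t : List Char) (ws : List (List Char)) (c : List Char) : List Char :=
  (if pvMutualB ws then ws.take 1 else ws).foldl (fun text w => pvOneB text w (pvNw c w)) t

def replace_color_list_alt (text : String) (word : List String) (color : String) : String :=
  String.ofList (pvListB text.toList (word.map String.toList) color.toList)

-- ===== PRECONDITION & SPEC =====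
def Spec_replace_color_list (text : String) (word : List String) (color : String) (out : String) : Prop := out = replace_color_list_alt text word color
instance (text : String) (word : List String) (color : String) (out : String) : Decidable (Spec_replace_color_list text word color out) := by unfold Spec_replace_color_list; infer_instance

-- ===== CLAIM (what is proved, stated in full; the proofs are below) =====
def Claim_equal_replace_color_list : Prop := ∀ (text : String) (word : List String) (color : String), Dom_replace_color_list text word color → Spec_replace_color_list text word color (replace_color_list text word color)

-- ===== LEMMAS AND PROOFS =====

-- A's scan reformulated on the ORIGINAL text: n = number of indices still to process, c = cut
def pvK (t w nw : List Char) : Nat → Nat → List Char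
  | 0, c => t.take c
  | n + 1, c =>
    if w.isPrefixOf (t.drop n) ∧ n + w.length ≤ c then
      pvK t w nw n n ++ nw ++ (t.take c).drop (n + w.length)
    else pvK t w nw n c

-- reference rendering: color the rightmost match below boundary e, recurse left of it
def pvR (t w nw : List Char) : Nat → Nat → List Char
  | 0, e => t.take e
  | fuel + 1, e =>
    let j := PySem.Chars.rfindFrom t w 0 (some (e : Int))
    if j < 0 then t.take e
    else pvR t w nw fuel j.toNat ++ nw ++ (t.take e).drop (j.toNat + w.length)

-- rfind.go finds the greatest j ≤ x with w a prefix of s.drop j (or -1)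
theorem pvGo_spec (s w : List Char) (x : Nat) :
    (PySem.Chars.rfind.go s w x = -1 ∧ ∀ j ≤ x, ¬ w <+: s.drop j) ∨
    (∃ r : Nat, PySem.Chars.rfind.go s w x = (r : Int) ∧ r ≤ x ∧ w <+: s.drop r ∧
      ∀ j ≤ x, w <+: s.drop j → j ≤ r) := by
  induction x with
  | zero =>
    by_cases h : w.isPrefixOf s
    · right
      exact ⟨0, by simp [PySem.Chars.rfind.go, h], le_refl _,
        by simpa using List.isPrefixOf_iff_prefix.mp h, fun j hj _ => hj⟩
    · left
      refine ⟨by simp [PySem.Chars.rfind.go, h], ?_⟩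
      intro j hj
      interval_cases j
      simpa using fun hp => h (List.isPrefixOf_iff_prefix.mpr hp)
  | succ n ih =>
    by_cases h : w.isPrefixOf (s.drop (n+1))
    · right
      exact ⟨n+1, by simp [PySem.Chars.rfind.go, h], le_refl _,
        List.isPrefixOf_iff_prefix.mp h, fun j hj _ => hj⟩
    · have hgo : PySem.Chars.rfind.go s w (n+1) = PySem.Chars.rfind.go s w n := by
        simp [PySem.Chars.rfind.go, h]
      have hnp : ¬ w <+: s.drop (n+1) := fun hp => h (List.isPrefixOf_iff_prefix.mpr hp)
      rcases ih with ⟨h1, h2⟩ | ⟨r, h1, h2, h3, h4⟩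
      · left
        refine ⟨hgo.trans h1, ?_⟩
        intro j hj
        rcases Nat.lt_or_ge j (n+1) with hj' | hj'
        · exact h2 j (by omega)
        · have hj2 : j = n + 1 := by omega
          subst hj2
          exact hnp
      · right
        refine ⟨r, hgo.trans h1, by omega, h3, ?_⟩
        intro j hj hp
        rcases Nat.lt_or_ge j (n+1) with hj' | hj'
        · exact h4 j (by omega) hp
        · have hj2 : j = n + 1 := by omega
          subst hj2
          exact absurd hp hnp

theorem pvRfindFrom_take (t w : List Char) (e : Nat) (he : e ≤ t.length) :
    PySem.Chars.rfindFrom t w 0 (some (e : Int)) = PySem.Chars.rfind (t.take e) w := by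
  have h1 : ¬ ((t.length : Int) < (e : Int)) := by omega
  have h2 : ¬ ((e : Int) < 0) := by omega
  simp only [PySem.Chars.rfindFrom, h1, h2, lt_self_iff_false, if_false, Int.toNat_zero,
    List.drop_zero, zero_add]
  split <;> rename_i h3
  · exact h3.symm
  · rfl

theorem pvPrefix_take_iff (t w : List Char) (hw : w ≠ []) (c j : Nat) (hc : c ≤ t.length) :
    w <+: (t.take c).drop j ↔ (w <+: t.drop j ∧ j + w.length ≤ c) := by
  rw [List.drop_take]
  constructor
  · intro h
    have h1 : w <+: t.drop j := h.trans (List.take_prefix _ _)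
    have h2 := h.length_le
    simp only [List.length_take, List.length_drop] at h2
    have hwpos : 0 < w.length := List.length_pos_of_ne_nil hw
    exact ⟨h1, by omega⟩
  · rintro ⟨h1, h2⟩
    rw [List.prefix_take_iff]
    have h3 := h1.length_le
    simp only [List.length_drop] at h3
    exact ⟨h1, by omega⟩

-- rfind on t.take c as "greatest admissible match position below cut c"
theorem pvRfind_spec (t w : List Char) (hw : w ≠ []) (c : Nat) (hc : c ≤ t.length) :
    (PySem.Chars.rfindFrom t w 0 (some (c : Int)) = -1 ∧
       ∀ j, ¬ (w <+: t.drop j ∧ j + w.length ≤ c)) ∨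
    (∃ r : Nat, PySem.Chars.rfindFrom t w 0 (some (c : Int)) = (r : Int) ∧
       w <+: t.drop r ∧ r + w.length ≤ c ∧
       ∀ j, w <+: t.drop j → j + w.length ≤ c → j ≤ r) := by
  rw [pvRfindFrom_take t w c hc]
  have hrg : PySem.Chars.rfind (t.take c) w
      = PySem.Chars.rfind.go (t.take c) w (t.take c).length := rfl
  rcases pvGo_spec (t.take c) w (t.take c).length with ⟨h1, h2⟩ | ⟨r, h1, h2, h3, h4⟩
  · left
    refine ⟨hrg.trans h1, ?_⟩
    rintro j ⟨hj1, hj2⟩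
    have hwpos : 0 < w.length := List.length_pos_of_ne_nil hw
    exact h2 j (by simp [List.length_take]; omega)
      ((pvPrefix_take_iff t w hw c j hc).mpr ⟨hj1, hj2⟩)
  · right
    have h3' := (pvPrefix_take_iff t w hw c r hc).mp h3
    refine ⟨r, hrg.trans h1, h3'.1, h3'.2, ?_⟩
    intro j hj1 hj2
    have hwpos : 0 < w.length := List.length_pos_of_ne_nil hw
    exact h4 j (by simp [List.length_take]; omega)
      ((pvPrefix_take_iff t w hw c j hc).mpr ⟨hj1, hj2⟩)

-- L1: A's fold from index n-1 downward, on a state  t.take c ++ r  with ESC-headed residue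
theorem pvL1 (t w nw : List Char) (hw : w ≠ []) (hesc : Char.ofNat 27 ∉ w)
    (hnw : ∃ tl, nw = Char.ofNat 27 :: tl) :
    ∀ (n c : Nat) (r : List Char), n ≤ c → c ≤ t.length →
      (r = [] ∨ ∃ r', r = Char.ofNat 27 :: r') →
      (PySem.List.pyRange ((n : Int) - 1) (-1) (-1)).foldl
        (fun cur i =>
          if PySem.List.slice cur (some i) (some (i + (w.length : Int))) = w then
            PySem.List.slice cur none (some i) ++ nw ++ PySem.List.slice cur (some (i + (w.length : Int))) none
          else cur) (t.take c ++ r)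
      = pvK t w nw n c ++ r := by
  have hwpos : 0 < w.length := List.length_pos_of_ne_nil hw
  intro n
  induction n with
  | zero =>
    intro c r _ _ _
    rw [show ((0:Nat):Int) - 1 = -1 by norm_num, PySem.List.pyRange_neg_one_eq_nil (by omega)]
    simp [pvK]
  | succ n ih =>
    intro c r hnc hct hr
    rw [show ((n+1:Nat):Int) - 1 = ((n:Nat):Int) by push_cast; ring,
        PySem.List.pyRange_neg_one_cons (by omega : (-1:Int) < ((n:Nat):Int))]
    simp only [List.foldl_cons]
    have hslice : PySem.List.slice (t.take c ++ r) (some ((n:Nat):Int)) (some (((n:Nat):Int) + (w.length : Int)))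
        = List.take w.length (List.drop n (t.take c ++ r)) :=
      PySem.List.slice_natCast_add (t.take c ++ r) n w.length
    have hdrop : List.drop n (t.take c ++ r) = List.take (c - n) (List.drop n t) ++ r := by
      rw [List.drop_append_of_le_length (by simp [List.length_take]; omega), List.drop_take]
    by_cases hfit : n + w.length ≤ c
    · have hsl2 : List.take w.length (List.drop n (t.take c ++ r)) = List.take w.length (List.drop n t) := by
        rw [hdrop, List.take_append_of_le_length (by simp [List.length_take, List.length_drop]; omega),
            List.take_take, min_eq_left (by omega)]
      by_cases hpre : w <+: t.drop n
      · have hcond : PySem.List.slice (t.take c ++ r) (some ((n:Nat):Int)) (some (((n:Nat):Int) + (w.length : Int))) = w := by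
          rw [hslice, hsl2]
          exact (List.prefix_iff_eq_take.mp hpre).symm
        rw [if_pos hcond]
        have hto : PySem.List.slice (t.take c ++ r) none (some ((n:Nat):Int)) = t.take n := by
          rw [PySem.List.slice_to _ (by omega : (0:Int) ≤ ((n:Nat):Int)), Int.toNat_natCast,
              List.take_append_of_le_length (by simp [List.length_take]; omega),
              List.take_take, min_eq_left (by omega)]
        have hfrom : PySem.List.slice (t.take c ++ r) (some (((n:Nat):Int) + (w.length : Int))) none
            = (t.take c).drop (n + w.length) ++ r := by
          rw [show ((n:Nat):Int) + (w.length : Int) = (((n + w.length : Nat)):Int) by push_cast; ring,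
              PySem.List.slice_from _ (by omega), Int.toNat_natCast,
              List.drop_append_of_le_length (by simp [List.length_take]; omega)]
        rw [hto, hfrom]
        obtain ⟨tl, rfl⟩ := hnw
        rw [show t.take n ++ (Char.ofNat 27 :: tl) ++ ((t.take c).drop (n + w.length) ++ r)
              = t.take n ++ ((Char.ofNat 27 :: tl) ++ ((t.take c).drop (n + w.length) ++ r)) by
            simp [List.append_assoc]]
        rw [ih n ((Char.ofNat 27 :: tl) ++ ((t.take c).drop (n + w.length) ++ r))
          (le_refl n) (by omega) (Or.inr ⟨_, rfl⟩)]
        rw [pvK, if_pos ⟨List.isPrefixOf_iff_prefix.mpr hpre, hfit⟩]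
        simp [List.append_assoc]
      · have hcond : ¬ (PySem.List.slice (t.take c ++ r) (some ((n:Nat):Int)) (some (((n:Nat):Int) + (w.length : Int))) = w) := by
          rw [hslice, hsl2]
          intro h
          exact hpre (List.prefix_iff_eq_take.mpr h.symm)
        rw [if_neg hcond, ih c r (by omega) hct hr]
        rw [pvK, if_neg (fun hh => hpre (List.isPrefixOf_iff_prefix.mp hh.1))]
    · have hlenL : (List.take (c - n) (List.drop n t)).length = c - n := by
        simp [List.length_take, List.length_drop]; omega
      have hcond : ¬ (PySem.List.slice (t.take c ++ r) (some ((n:Nat):Int)) (some (((n:Nat):Int) + (w.length : Int))) = w) := by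
        rw [hslice, hdrop]
        rcases hr with rfl | ⟨r', rfl⟩
        · intro h
          have := congrArg List.length h
          simp only [List.append_nil, List.length_take, hlenL] at this
          simp [List.length_take, List.length_drop] at this
          omega
        · intro h
          have hidx : c - n < w.length := by omega
          have hq : w[c - n]? = some (Char.ofNat 27) := by
            rw [← h, List.getElem?_take_of_lt hidx, List.getElem?_append_right (by omega)]
            simp [hlenL]
          exact hesc (List.mem_of_getElem? hq)
      rw [if_neg hcond, ih c r (by omega) hct hr]
      rw [pvK, if_neg (fun hh => hfit hh.2)]

-- L2: pvK equals the reference pvR when every admissible match lies below n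
theorem pvL2 (t w nw : List Char) (hw : w ≠ []) :
    ∀ (n fuel c : Nat), n + 1 ≤ fuel → c ≤ t.length →
      (∀ j, w <+: t.drop j → j + w.length ≤ c → j < n) →
      pvK t w nw n c = pvR t w nw fuel c := by
  have hwpos : 0 < w.length := List.length_pos_of_ne_nil hw
  intro n
  induction n with
  | zero =>
    intro fuel c hfuel hct hadm
    match fuel, hfuel with
    | f + 1, _ =>
      simp only [pvR, pvK]
      rcases pvRfind_spec t w hw c hct with ⟨h1, _⟩ | ⟨r, h1, h2, h3, _⟩
      · rw [h1]
        norm_num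
      · exact absurd (hadm r h2 h3) (by omega)
  | succ n ih =>
    intro fuel c hfuel hct hadm
    match fuel, hfuel with
    | f + 1, hfuel =>
      by_cases hcase : w.isPrefixOf (t.drop n) = true ∧ n + w.length ≤ c
      · have hpre := List.isPrefixOf_iff_prefix.mp hcase.1
        have hjn : PySem.Chars.rfindFrom t w 0 (some (c : Int)) = ((n:Nat) : Int) := by
          rcases pvRfind_spec t w hw c hct with ⟨_, h2⟩ | ⟨r, h1, h2, h3, h4⟩
          · exact absurd ⟨hpre, hcase.2⟩ (h2 n)
          · have hr1 : r < n + 1 := hadm r h2 h3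
            have hr2 : n ≤ r := h4 n hpre hcase.2
            have : r = n := by omega
            rw [h1, this]
        rw [pvK, if_pos hcase]
        simp only [pvR]
        rw [hjn]
        rw [if_neg (by omega : ¬ (((n:Nat):Int) < 0)), Int.toNat_natCast]
        rw [ih f n (by omega) (by omega) (fun j _ hj2 => by omega)]
      · rw [pvK, if_neg hcase]
        apply ih (f+1) c (by omega) hct
        intro j hj1 hj2
        have := hadm j hj1 hj2
        rcases Nat.lt_or_ge j n with h | h
        · exact h
        · exfalso
          have : j = n := by omega
          subst this
          exact hcase ⟨List.isPrefixOf_iff_prefix.mpr hj1, hj2⟩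

-- pieces accumulate on the right
theorem pvPiecesB_acc (t w : List Char) :
    ∀ (fuel e : Nat) (pieces : List (List Char)),
      pvPiecesB t w fuel e pieces =
        (pieces ++ (pvPiecesB t w fuel e []).1, (pvPiecesB t w fuel e []).2) := by
  intro fuel
  induction fuel with
  | zero => intro e pieces; simp [pvPiecesB]
  | succ n ih =>
    intro e pieces
    simp only [pvPiecesB]
    split <;> rename_i h
    · simp
    · rw [ih _ (pieces ++ _), ih _ ([] ++ _)]
      simp

theorem pvJoin_singleton (sep x : List Char) : PySem.Chars.join sep [x] = x := by
  simp [PySem.Chars.join, List.intercalate]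

theorem pvJoin_cons (sep x y : List Char) (l : List (List Char)) :
    PySem.Chars.join sep (x :: y :: l) = x ++ sep ++ PySem.Chars.join sep (y :: l) := by
  simp [PySem.Chars.join, List.intercalate, List.append_assoc]

theorem pvJoin_append_singleton (sep x : List Char) :
    ∀ l, l ≠ [] → PySem.Chars.join sep (l ++ [x]) = PySem.Chars.join sep l ++ sep ++ x := by
  intro l
  induction l with
  | nil => intro h; exact absurd rfl h
  | cons a l ih =>
    intro _
    match l with
    | [] =>
      rw [show ([a] ++ [x] : List (List Char)) = [a, x] from rfl, pvJoin_cons,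
          pvJoin_singleton, pvJoin_singleton]
    | b :: l' =>
      have ih' := ih (by simp)
      rw [List.cons_append] at ih'
      rw [List.cons_append, List.cons_append, pvJoin_cons, ih', pvJoin_cons]
      simp [List.append_assoc]

-- L3: B's pieces-and-join equals the reference pvR
theorem pvL3 (t w nw : List Char) (hw : w ≠ []) :
    ∀ (fuel e : Nat), e ≤ t.length →
      PySem.Chars.join nw
        (((pvPiecesB t w fuel e []).1 ++
          [PySem.List.slice t none (some (((pvPiecesB t w fuel e []).2 : Nat) : Int))]).reverse)
      = pvR t w nw fuel e := by
  intro fuel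
  induction fuel with
  | zero =>
    intro e he
    simp only [pvPiecesB, pvR, List.nil_append, List.reverse_cons, List.reverse_nil]
    rw [pvJoin_singleton, PySem.List.slice_to _ (by omega), Int.toNat_natCast]
  | succ f ih =>
    intro e he
    simp only [pvPiecesB, pvR]
    by_cases hj : PySem.Chars.rfindFrom t w 0 (some (e : Int)) < 0
    · rw [if_pos hj, if_pos hj]
      simp only [List.nil_append, List.reverse_cons, List.reverse_nil]
      rw [pvJoin_singleton, PySem.List.slice_to _ (by omega), Int.toNat_natCast]
    · rw [if_neg hj, if_neg hj]
      rcases pvRfind_spec t w hw e he with ⟨h1, _⟩ | ⟨r, h1, h2, h3, _⟩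
      · exact absurd (by rw [h1]; norm_num) hj
      · have hwpos : 0 < w.length := List.length_pos_of_ne_nil hw
        rw [h1, Int.toNat_natCast, List.nil_append]
        have hre : r ≤ t.length := by omega
        have hp : PySem.List.slice t (some ((r:Int) + (w.length : Int))) (some (e : Int))
            = (t.take e).drop (r + w.length) := by
          rw [show (r:Int) + (w.length : Int) = (((r + w.length : Nat)):Int) by push_cast; ring]
          rw [PySem.List.slice_natCast, List.drop_take]
        rw [hp]
        simp only [pvPiecesB_acc t w f r [(t.take e).drop (r + w.length)]]
        rw [show ([(t.take e).drop (r + w.length)] ++ (pvPiecesB t w f r []).1)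
              ++ [PySem.List.slice t none (some (((pvPiecesB t w f r []).2 : Nat) : Int))]
            = [(t.take e).drop (r + w.length)] ++ ((pvPiecesB t w f r []).1
              ++ [PySem.List.slice t none (some (((pvPiecesB t w f r []).2 : Nat) : Int))]) by
          simp [List.append_assoc]]
        rw [List.reverse_append,
            show ([(t.take e).drop (r + w.length)] : List (List Char)).reverse
              = [(t.take e).drop (r + w.length)] from rfl]
        rw [pvJoin_append_singleton nw _ _ (by simp), ih r hre]

-- L4 chain: the empty word inserts new_word at every position, right to left
theorem pvSliceSelf (cur : List Char) (i : Int) :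
    PySem.List.slice cur (some i) (some i) = [] := by
  simp [PySem.List.slice]

theorem pvL4aux (t nw : List Char) :
    ∀ (n : Nat) (r : List Char), n ≤ t.length →
      (PySem.List.pyRange ((n : Int) - 1) (-1) (-1)).foldl
        (fun cur i => PySem.List.slice cur none (some i) ++ nw ++ PySem.List.slice cur (some i) none)
        (t.take n ++ r)
      = (t.take n).flatMap (fun ch => nw ++ [ch]) ++ r := by
  intro n
  induction n with
  | zero =>
    intro r _
    rw [PySem.List.pyRange_neg_one_eq_nil (by omega)]
    simp
  | succ n ih =>
    intro r hn
    rw [show ((n+1:Nat):Int) - 1 = (n:Int) by push_cast; ring,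
        PySem.List.pyRange_neg_one_cons (by omega : (-1:Int) < (n:Int))]
    simp only [List.foldl_cons]
    have hstate : PySem.List.slice (t.take (n+1) ++ r) none (some (n:Int)) ++ nw ++
        PySem.List.slice (t.take (n+1) ++ r) (some (n:Int)) none
        = t.take n ++ nw ++ (t[n]'(by omega) :: r) := by
      rw [PySem.List.slice_to _ (by omega : (0:Int) ≤ (n:Int)),
          PySem.List.slice_from _ (by omega : (0:Int) ≤ (n:Int)), Int.toNat_natCast]
      rw [List.take_append_of_le_length (by simp; omega),
          List.drop_append_of_le_length (by simp; omega)]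
      rw [List.take_take, min_eq_left (by omega)]
      rw [List.drop_take]
      have h1 : n + 1 - n = 1 := by omega
      have h2 : List.take 1 (List.drop n t) = [t[n]'(by omega)] := by
        rw [List.drop_eq_getElem_cons (by omega : n < t.length)]
        rfl
      rw [h1, h2]
      rfl
    rw [hstate, List.append_assoc]
    rw [ih (nw ++ (t[n]'(by omega) :: r)) (by omega)]
    have h3 : List.take (n+1) t = List.take n t ++ [t[n]'(by omega)] := by
      rw [List.take_succ, List.getElem?_eq_getElem (by omega : n < t.length)]
      rfl
    rw [h3, List.flatMap_append]
    simp

theorem pvFlatTail (t nw : List Char) :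
    t.flatMap (fun ch => nw ++ [ch]) ++ nw = nw ++ t.flatMap (fun ch => ch :: nw) := by
  induction t with
  | nil => simp
  | cons c t ih =>
    simp only [List.flatMap_cons, List.append_assoc] at *
    rw [ih]
    simp

theorem pvL4 (t nw : List Char) :
    pvLoopA t [] nw = nw ++ t.flatMap (fun ch => ch :: nw) := by
  unfold pvLoopA
  simp only [List.length_nil, Nat.cast_zero, sub_zero, add_zero, pvSliceSelf, if_pos]
  rw [PySem.List.pyRange_neg_one_cons (by omega : (-1:Int) < (t.length:Int))]
  simp only [List.foldl_cons]
  have hstate : PySem.List.slice t none (some (t.length:Int)) ++ nw ++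
      PySem.List.slice t (some (t.length:Int)) none = t.take t.length ++ nw := by
    rw [PySem.List.slice_to _ (by omega), PySem.List.slice_from _ (by omega), Int.toNat_natCast]
    simp
  rw [hstate]
  have := pvL4aux t nw t.length nw (le_refl _)
  rw [this, List.take_length, pvFlatTail]

-- per-word equality
theorem pvOne_eq (t w c0 : List Char) (hesc : Char.ofNat 27 ∉ w) :
    pvLoopA t w (pvNw c0 w) = pvOneB t w (pvNw c0 w) := by
  by_cases hwnil : w = []
  · subst hwnil
    rw [pvL4]
    simp [pvOneB]
  · have hwpos : 0 < w.length := List.length_pos_of_ne_nil hwnil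
    have hnw : ∃ tl, pvNw c0 w = Char.ofNat 27 :: tl := ⟨_, rfl⟩
    simp only [pvOneB, if_neg hwnil]
    by_cases hle : w.length ≤ t.length
    · have h0 := pvL1 t w (pvNw c0 w) hwnil hesc hnw (t.length - w.length + 1) t.length []
        (by omega) (le_refl _) (Or.inl rfl)
      simp only [List.take_length, List.append_nil] at h0
      unfold pvLoopA
      rw [show (t.length : Int) - (w.length : Int) = (((t.length - w.length + 1 : Nat)):Int) - 1 by omega]
      rw [h0]
      rw [pvL2 t w (pvNw c0 w) hwnil (t.length - w.length + 1) (t.length + 1) t.length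
        (by omega) (le_refl _) (fun j _ hj2 => by omega)]
      exact (pvL3 t w (pvNw c0 w) hwnil (t.length + 1) t.length (le_refl _)).symm
    · unfold pvLoopA
      rw [PySem.List.pyRange_neg_one_eq_nil (by omega : (t.length : Int) - (w.length : Int) ≤ -1)]
      simp only [List.foldl_nil]
      have hjn : PySem.Chars.rfindFrom t w 0 (some ((t.length : Nat) : Int)) = -1 := by
        rcases pvRfind_spec t w hwnil t.length (le_refl _) with ⟨h1, _⟩ | ⟨r, _, h2, h3, _⟩
        · exact h1
        · exfalso
          have := h2.length_le
          simp [List.length_drop] at this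
          omega
      simp only [pvPiecesB]
      rw [hjn, if_pos (by norm_num : (-1 : Int) < 0)]
      simp only [List.nil_append, List.reverse_cons, List.reverse_nil]
      rw [pvJoin_singleton, PySem.List.slice_to _ (by omega), Int.toNat_natCast, List.take_length]

-- the duplicate/containment tests agree
theorem pvEnum_any {α : Type} (ws : List α) (p : Int × α → Bool) :
    ∀ s : Int, ((PySem.List.enumerate ws s).any p = true ↔
      ∃ (k : Nat) (h : k < ws.length), p (s + k, ws[k]) = true) := by
  induction ws with
  | nil => intro s; simp [PySem.List.enumerate]
  | cons a l ih =>
    intro s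
    rw [PySem.List.enumerate_cons]
    simp only [List.any_cons, Bool.or_eq_true, ih (s+1)]
    constructor
    · rintro (h | ⟨k, hk, hp⟩)
      · exact ⟨0, by simp, by simpa using h⟩
      · refine ⟨k+1, by simpa using Nat.succ_lt_succ hk, ?_⟩
        have h1 : s + ((k:Int) + 1) = s + 1 + (k:Int) := by ring
        push_cast
        rw [h1]
        simpa using hp
    · rintro ⟨k, hk, hp⟩
      match k, hk, hp with
      | 0, hk, hp => left; simpa using hp
      | k+1, hk, hp =>
        right
        refine ⟨k, by simpa using hk, ?_⟩
        have h1 : s + ((k:Int) + 1) = s + 1 + (k:Int) := by ring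
        push_cast at hp
        rw [h1] at hp
        simpa using hp

theorem pvMutual_iff (ws : List (List Char)) :
    pvMutualB ws = true ↔
      ∃ (i j : Nat) (hi : i < ws.length) (hj : j < ws.length), i ≠ j ∧ ws[i] <:+: ws[j] := by
  unfold pvMutualB
  rw [pvEnum_any]
  constructor
  · rintro ⟨i, hi, hp⟩
    rw [pvEnum_any] at hp
    rcases hp with ⟨j, hj, hp⟩
    simp only [Bool.and_eq_true, decide_eq_true_eq, PySem.Chars.isIn_iff_infix] at hp
    refine ⟨i, j, hi, hj, ?_, hp.2⟩
    intro hij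
    exact hp.1 (by simp [hij])
  · rintro ⟨i, j, hi, hj, hne, hinf⟩
    refine ⟨i, hi, ?_⟩
    rw [pvEnum_any]
    refine ⟨j, hj, ?_⟩
    simp only [Bool.and_eq_true, decide_eq_true_eq, PySem.Chars.isIn_iff_infix]
    refine ⟨?_, hinf⟩
    simp only [zero_add]
    intro hij
    exact hne (by exact_mod_cast hij)

theorem pvInEach_iff (ws : List (List Char)) :
    pvInEachOtherA ws = true ↔
      ∃ (i j : Nat) (hi : i < ws.length) (hj : j < ws.length), i ≠ j ∧ ws[i] <:+: ws[j] := by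
  unfold pvInEachOtherA
  simp only [List.any_eq_true, PySem.List.mem_pyRange_one, Bool.and_eq_true, decide_eq_true_eq]
  constructor
  · rintro ⟨i, ⟨hi0, hi1⟩, j, ⟨hj0, hj1⟩, hfind, hne⟩
    rw [PySem.List.pyGetD_eq_getElem ws [] hj0 hj1,
        PySem.List.pyGetD_eq_getElem ws [] hi0 hi1,
        PySem.Chars.find_nonneg_iff] at hfind
    exact ⟨i.toNat, j.toNat, by omega, by omega, fun h => hne (by omega), hfind⟩
  · rintro ⟨i, j, hi, hj, hne, hinf⟩
    refine ⟨(i : Int), ⟨by omega, by exact_mod_cast hi⟩, (j : Int), ⟨by omega, by exact_mod_cast hj⟩, ?_, by exact_mod_cast hne⟩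
    rw [PySem.List.pyGetD_eq_getElem ws [] (by omega) (by exact_mod_cast hj),
        PySem.List.pyGetD_eq_getElem ws [] (by omega) (by exact_mod_cast hi),
        PySem.Chars.find_nonneg_iff]
    simpa using hinf

theorem pvMutual_eq (ws : List (List Char)) : pvInEachOtherA ws = pvMutualB ws := by
  rw [Bool.eq_iff_iff, pvInEach_iff, pvMutual_iff]

theorem pvMutual_ne_nil (ws : List (List Char)) (h : pvInEachOtherA ws = true) : ws ≠ [] := by
  rcases (pvInEach_iff ws).mp h with ⟨i, j, hi, -, -, -⟩
  intro hnil
  rw [hnil] at hi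
  simp at hi

theorem pvList_eq (t : List Char) (ws : List (List Char)) (c : List Char)
    (H : ∀ w ∈ ws, Char.ofNat 27 ∉ w) : pvListA t ws c = pvListB t ws c := by
  unfold pvListA pvListB
  rw [pvMutual_eq]
  by_cases hm : pvMutualB ws = true
  · rw [if_pos hm, if_pos hm]
    have hne : ws ≠ [] := pvMutual_ne_nil ws (by rw [pvMutual_eq]; exact hm)
    match ws, hne with
    | a :: l, _ =>
      unfold pvReplaceColorA
      rw [PySem.List.pyGetD_zero_cons]
      rw [show (a :: l).take 1 = [a] from rfl]
      simp only [List.foldl_cons, List.foldl_nil]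
      exact pvOne_eq t a c (H a (by simp))
  · rw [if_neg hm, if_neg hm]
    exact PySem.List.foldl_congr_mem ws _ _ t (fun acc x hx => pvOne_eq acc x c (H x hx))

-- ===== VERDICT (by name: the statement is the Claim_ definition above) =====
theorem replace_color_list_spec : Claim_equal_replace_color_list := by
  intro text word color hdom
  unfold Spec_replace_color_list replace_color_list replace_color_list_alt
  refine congrArg String.ofList (pvList_eq _ _ _ ?_)
  intro w hw hmem
  simp only [Dom_replace_color_list, Bool.and_eq_true] at hdom
  obtain ⟨⟨-, hword⟩, -⟩ := hdom
  rcases List.mem_map.mp hw with ⟨s, hs, rfl⟩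
  have := List.all_eq_true.mp hword s hs
  have := List.all_eq_true.mp (by simpa [pvDomStr] using this) _ hmem
  simp [pvDomChar] at this
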